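-- pv_equiv track=rewrite | github.com/CarlosHernandezP/Pose_extraction_comparison | shot_detector/utils.py | get_idle_player
-- ===== SOURCE A (Python) =====
-- def get_idle_player(poses, active_idx):
--     """
--     Returns the index of the player that is NOT the active_idx.
--     Selects the first available index that isn't active_idx.
--     """
--     if not poses or len(poses) < 2:
--         return -1
--
--     # If active_idx is -1, just return the first one? Or -1?
--     if active_idx == -1:
--         return 0 # Fallback
--
--     for i in range(len(poses)):
--         if i != active_idx:
--             return i
--     return -1
-- ===== SOURCE B (Python) =====
-- def get_idle_player(poses, active_idx):
--     if not poses or len(poses) < 2: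
--         return -1
--     if active_idx == -1:
--         return 0
--     return 1 if active_idx == 0 else 0
-- ===== Notes on version B (the rewrite author's own statement) =====
-- stated objective: simpler
-- what changed: The scan over range(len(poses)) for the first index not equal to active_idx is replaced by the closed-form expression 1 if active_idx == 0 else 0, valid because len(poses) >= 2 after the guards.
import Mathlib
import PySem

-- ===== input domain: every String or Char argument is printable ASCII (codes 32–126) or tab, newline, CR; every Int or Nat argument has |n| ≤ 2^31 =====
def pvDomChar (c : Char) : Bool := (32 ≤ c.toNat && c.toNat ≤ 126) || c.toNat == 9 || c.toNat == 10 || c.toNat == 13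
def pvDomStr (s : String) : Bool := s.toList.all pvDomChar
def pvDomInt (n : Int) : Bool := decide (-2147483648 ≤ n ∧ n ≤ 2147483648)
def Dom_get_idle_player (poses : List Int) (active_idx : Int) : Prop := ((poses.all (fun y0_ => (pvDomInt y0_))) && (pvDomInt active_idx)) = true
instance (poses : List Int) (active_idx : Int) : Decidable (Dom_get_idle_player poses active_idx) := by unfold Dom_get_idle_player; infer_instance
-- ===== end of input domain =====

-- B replaces A's linear scan with a constant-time closed form; return values are identical.

-- ===== PORT A =====
-- the for-loop: return the first i in range(len(poses)) with i ≠ active_idx, else -1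
def get_idle_player_loop (active_idx : Int) : List Int → Int
  | [] => -1
  | i :: rest => if i ≠ active_idx then i else get_idle_player_loop active_idx rest

def get_idle_player (poses : List Int) (active_idx : Int) : Int :=
  if poses = [] ∨ (poses.length : Int) < 2 then -1
  else if active_idx = -1 then 0
  else get_idle_player_loop active_idx (PySem.List.pyRange 0 (poses.length : Int) 1)

-- ===== PORT B =====
def get_idle_player_alt (poses : List Int) (active_idx : Int) : Int :=
  if poses = [] ∨ (poses.length : Int) < 2 then -1
  else if active_idx = -1 then 0
  else if active_idx = 0 then 1 else 0

-- ===== PRECONDITION & SPEC =====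
def Spec_get_idle_player (poses : List Int) (active_idx : Int) (out : Int) : Prop := out = get_idle_player_alt poses active_idx
instance (poses : List Int) (active_idx : Int) (out : Int) : Decidable (Spec_get_idle_player poses active_idx out) := by unfold Spec_get_idle_player; infer_instance

-- ===== CLAIM (what is proved, stated in full; the proofs are below) =====
def Claim_equal_get_idle_player : Prop := ∀ (poses : List Int) (active_idx : Int), Dom_get_idle_player poses active_idx → Spec_get_idle_player poses active_idx (get_idle_player poses active_idx)

-- ===== LEMMAS AND PROOFS =====

-- on range starting 0 of length ≥ 2, the loop returns 1 if active_idx = 0 else 0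
lemma loop_range (n : Int) (active_idx : Int) (h : 2 ≤ n) :
    get_idle_player_loop active_idx (PySem.List.pyRange 0 n 1) =
      if active_idx = 0 then 1 else 0 := by
  rw [PySem.List.pyRange_one_cons (by omega), PySem.List.pyRange_one_cons (by omega)]
  by_cases hA : active_idx = 0
  · simp [get_idle_player_loop, hA]
  · simp [get_idle_player_loop, hA, Ne.symm hA]

-- ===== VERDICT (by name: the statement is the Claim_ definition above) =====
theorem get_idle_player_spec : Claim_equal_get_idle_player := by
  intro poses active_idx _
  unfold Spec_get_idle_player get_idle_player get_idle_player_alt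
  split_ifs with h1 h2 h3
  · rfl
  · rfl
  · rw [loop_range _ _ (by omega), if_pos h3]
  · rw [loop_range _ _ (by omega), if_neg h3]
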